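-- pv_equiv track=rewrite | github.com/ukbol/mind-the-gap | ncbi_processing/ncbi_gb_extract/ncbi_gb_extract.py | get_ordered_columns
-- ===== SOURCE A (Python) =====
-- from typing import Dict, List, Optional, Set, Tuple
--
-- def get_ordered_columns(all_columns: Set[str]) -> List[str]:
--     """
--     Return columns in a logical order.
--
--     Args:
--         all_columns: Set of all column names
--
--     Returns:
--         Ordered list of column names
--     """
--     # Define preferred order for known columns
--     priority_order = [
--         'locus_name', 'locus_length', 'locus_mol_type', 'locus_topology',
--         'locus_division', 'locus_date',
--         'definition', 'accession', 'version', 'keywords',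
--         'organism', 'taxonomy',
--         'ref_authors', 'ref_title', 'ref_journal',
--         'comment',
--         # Duplicate/feature tracking columns
--         'is_duplicate', 'feature_index', 'feature_count', 'feature_type'
--     ]
--
--     # Source columns
--     source_cols = sorted([c for c in all_columns if c.startswith('source_')])
--
--     # CDS columns
--     cds_cols = sorted([c for c in all_columns if c.startswith('cds_')])
--
--     # Nucleotide sequence
--     nuc_col = ['nucleotide_sequence'] if 'nucleotide_sequence' in all_columns else []
--
--     # Build ordered list
--     ordered = []
--     for col in priority_order:
--         if col in all_columns:
--             ordered.append(col)
--
--     ordered.extend(source_cols)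
--     ordered.extend(cds_cols)
--     ordered.extend(nuc_col)
--
--     # Add any remaining columns not yet included
--     remaining = sorted(all_columns - set(ordered))
--     ordered.extend(remaining)
--
--     return ordered
-- ===== SOURCE B (Python) =====
-- from typing import List, Set
--
-- def get_ordered_columns(all_columns: Set[str]) -> List[str]:
--     """Return columns in a logical order (single keyed sort)."""
--     priority_order = [
--         'locus_name', 'locus_length', 'locus_mol_type', 'locus_topology',
--         'locus_division', 'locus_date',
--         'definition', 'accession', 'version', 'keywords',
--         'organism', 'taxonomy',
--         'ref_authors', 'ref_title', 'ref_journal',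
--         'comment',
--         'is_duplicate', 'feature_index', 'feature_count', 'feature_type'
--     ]
--     prio = {name: i for i, name in enumerate(priority_order)}
--
--     def key(col):
--         i = prio.get(col)
--         if i is not None:
--             return (i, '')
--         if col.startswith('source_'):
--             return (20, col)
--         if col.startswith('cds_'):
--             return (21, col)
--         if col == 'nucleotide_sequence':
--             return (22, '')
--         return (23, col)
--
--     return sorted(all_columns, key=key)
-- ===== Notes on version B (the rewrite author's own statement) =====
-- stated objective: simpler
-- what changed: A builds four filtered/sorted sublists plus a set-difference pass and concatenates them; B makes one single sorted() call with a tuple key (priority index, or bucket number with the column name as tie-breaker).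
import Mathlib
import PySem

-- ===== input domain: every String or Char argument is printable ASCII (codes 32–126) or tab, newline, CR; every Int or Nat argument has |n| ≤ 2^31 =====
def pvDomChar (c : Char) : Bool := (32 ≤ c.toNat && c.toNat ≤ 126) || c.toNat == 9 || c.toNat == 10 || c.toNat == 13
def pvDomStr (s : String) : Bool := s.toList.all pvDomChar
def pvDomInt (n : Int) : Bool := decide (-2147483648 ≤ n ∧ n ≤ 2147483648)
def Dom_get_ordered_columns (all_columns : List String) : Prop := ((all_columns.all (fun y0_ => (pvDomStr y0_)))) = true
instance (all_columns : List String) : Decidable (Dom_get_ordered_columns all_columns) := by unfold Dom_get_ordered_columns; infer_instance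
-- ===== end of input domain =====

-- B replaces A's four filtered/sorted sublists plus set-difference concatenation by one single keyed sort (objective: simpler).

-- ===== PORT A =====
-- the priority_order literal both Pythons contain
def pvPriorityOrder : List String :=
  ["locus_name", "locus_length", "locus_mol_type", "locus_topology",
   "locus_division", "locus_date",
   "definition", "accession", "version", "keywords",
   "organism", "taxonomy",
   "ref_authors", "ref_title", "ref_journal",
   "comment",
   "is_duplicate", "feature_index", "feature_count", "feature_type"]

def get_ordered_columns (all_columns : List String) : List String :=
  let source_cols := PySem.List.sorted (all_columns.filter (fun c => PySem.Str.startswith c "source_")) (fun x => x) false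
  let cds_cols := PySem.List.sorted (all_columns.filter (fun c => PySem.Str.startswith c "cds_")) (fun x => x) false
  let nuc_col : List String := if all_columns.contains "nucleotide_sequence" then ["nucleotide_sequence"] else []
  let ordered0 := pvPriorityOrder.foldl (fun acc col => if all_columns.contains col then acc ++ [col] else acc) ([] : List String)
  let ordered := ((ordered0 ++ source_cols) ++ cds_cols) ++ nuc_col
  let remaining := PySem.List.sorted (PySem.Set.diff all_columns (PySem.Set.ofList ordered)) (fun x => x) false
  ordered ++ remaining

-- ===== PORT B =====
-- prio = {name: i for i, name in enumerate(priority_order)}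
def pvPrioDict : PySem.Dict String Int :=
  (PySem.List.enumerate pvPriorityOrder 0).foldl (fun d p => d.insert p.2 p.1) PySem.Dict.empty

-- the tuple returned by Source B's key(col)
def pvKey (col : String) : Int × String :=
  match pvPrioDict.get? col with
  | some i => (i, "")
  | none =>
    if PySem.Str.startswith col "source_" then (20, col)
    else if PySem.Str.startswith col "cds_" then (21, col)
    else if col = "nucleotide_sequence" then (22, "")
    else (23, col)

def get_ordered_columns_alt (all_columns : List String) : List String :=
  PySem.List.sorted2 all_columns (fun c => (pvKey c).1) (fun c => (pvKey c).2) false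

-- ===== PRECONDITION & SPEC =====
-- The Python parameter is a set; under the type convention the list holds DISTINCT elements,
-- so Pre_ states exactly that (a list with duplicates does not represent any Python set input).
def Pre_get_ordered_columns (all_columns : List String) : Prop := all_columns.Nodup
instance (all_columns : List String) : Decidable (Pre_get_ordered_columns all_columns) := by unfold Pre_get_ordered_columns; infer_instance

def pvWitness_get_ordered_columns : List String :=
  ["cds_gene", "accession", "nucleotide_sequence", "zzz", "source_a", "locus_name"]

def Spec_get_ordered_columns (all_columns : List String) (out : List String) : Prop := out = get_ordered_columns_alt all_columns
instance (all_columns : List String) (out : List String) : Decidable (Spec_get_ordered_columns all_columns out) := by unfold Spec_get_ordered_columns; infer_instance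

-- ===== CLAIM (what is proved, stated in full; the proofs are below) =====
def Claim_equal_get_ordered_columns : Prop := ∀ (all_columns : List String), Dom_get_ordered_columns all_columns → Pre_get_ordered_columns all_columns → Spec_get_ordered_columns all_columns (get_ordered_columns all_columns)

-- ===== LEMMAS AND PROOFS =====

-- B's lexicographic tuple key, packaged as a Lex value
def pvKeyL (c : String) : Int ×ₗ String := toLex (pvKey c)

-- A's five buckets, named
def pvB0 (xs : List String) : List String := pvPriorityOrder.filter (fun col => xs.contains col)
def pvB1 (xs : List String) : List String :=
  PySem.List.sorted (xs.filter (fun c => PySem.Str.startswith c "source_")) (fun x => x) false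
def pvB2 (xs : List String) : List String :=
  PySem.List.sorted (xs.filter (fun c => PySem.Str.startswith c "cds_")) (fun x => x) false
def pvB3 (xs : List String) : List String :=
  if xs.contains "nucleotide_sequence" then ["nucleotide_sequence"] else []
def pvPre4 (xs : List String) : List String := ((pvB0 xs ++ pvB1 xs) ++ pvB2 xs) ++ pvB3 xs
def pvB4 (xs : List String) : List String :=
  PySem.List.sorted (xs.filter (fun c => !(pvPre4 xs).contains c)) (fun x => x) false

-- sorted2 with two keys is sorted with the lexicographic pair key
theorem pv_sorted2_eq_sorted_toLex {α κ₁ κ₂ : Type} [LinearOrder κ₁] [LinearOrder κ₂]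
    (xs : List α) (k1 : α → κ₁) (k2 : α → κ₂) :
    PySem.List.sorted2 xs k1 k2 false = PySem.List.sorted xs (fun x => toLex (k1 x, k2 x)) false := by
  have h : (fun (a b : α) => decide (k1 a < k1 b) || (!decide (k1 b < k1 a) && decide (k2 a < k2 b)))
         = fun a b => decide (toLex (k1 a, k2 a) < toLex (k1 b, k2 b)) := by
    funext a b
    rcases lt_trichotomy (k1 a) (k1 b) with h|h|h
    · simp [Prod.Lex.lt_iff, h, not_lt_of_gt]
    · simp [Prod.Lex.lt_iff, h]
    · simp [Prod.Lex.lt_iff, h, not_lt_of_gt h, not_lt_of_gt]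
  unfold PySem.List.sorted2 PySem.List.sorted
  simp only [Bool.false_eq_true, if_false, h]

theorem pv_contains_ofList (l : List String) (c : String) :
    (PySem.Set.ofList l).contains c = l.contains c := by
  simp [PySem.Set.contains, List.contains_eq_mem, PySem.Set.mem_ofList]

-- A's result, written as the five buckets
theorem pv_A_buckets (xs : List String) : get_ordered_columns xs = pvPre4 xs ++ pvB4 xs := by
  unfold get_ordered_columns pvB4 pvPre4 pvB0 pvB1 pvB2 pvB3
  simp only [PySem.List.foldl_append_if, List.nil_append, List.map_id', PySem.Set.diff,
    pv_contains_ofList]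

-- decidable facts about the literal priority list / dict
theorem pv_keys_prio : pvPrioDict.keys = pvPriorityOrder := by decide
theorem pv_prio_not_src : ∀ c ∈ pvPriorityOrder, PySem.Str.startswith c "source_" = false := by decide
theorem pv_prio_not_cds : ∀ c ∈ pvPriorityOrder, PySem.Str.startswith c "cds_" = false := by decide
theorem pv_pairwise_prio_key : pvPriorityOrder.Pairwise (fun a b => pvKeyL a < pvKeyL b) := by decide
theorem pv_key_prio : ∀ c ∈ pvPriorityOrder, (pvKey c).1 < 20 ∧ (pvKey c).2 = "" := by decide
theorem pv_key_nuc : pvKey "nucleotide_sequence" = (22, "") := by decide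

-- a string cannot start with both "source_" and "cds_"
theorem pv_src_not_cds (c : String) (h1 : PySem.Str.startswith c "source_" = true) :
    PySem.Str.startswith c "cds_" = false := by
  by_contra hne
  have h2 : PySem.Str.startswith c "cds_" = true := by
    cases hb : PySem.Str.startswith c "cds_" <;> simp_all
  rw [PySem.Str.startswith_eq, PySem.Chars.startswith_iff] at h1 h2
  rcases List.prefix_or_prefix_of_prefix h1 h2 with h|h <;> revert h <;> decide

-- key evaluation
theorem pv_get_none {c : String} (h : c ∉ pvPriorityOrder) : pvPrioDict.get? c = none :=
  (PySem.Dict.get?_eq_none_iff_not_mem_keys _ _).mpr (pv_keys_prio ▸ h)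

theorem pv_key_src {c : String} (h : PySem.Str.startswith c "source_" = true) : pvKey c = (20, c) := by
  have hn : c ∉ pvPriorityOrder := fun hm => by rw [pv_prio_not_src c hm] at h; exact Bool.false_ne_true h
  have h' : PySem.Chars.startswith c.toList ['s', 'o', 'u', 'r', 'c', 'e', '_'] = true := by
    rw [PySem.Str.startswith_eq] at h; exact h
  simp [pvKey, pv_get_none hn, h']

theorem pv_key_cds {c : String} (h : PySem.Str.startswith c "cds_" = true) : pvKey c = (21, c) := by
  have hn : c ∉ pvPriorityOrder := fun hm => by rw [pv_prio_not_cds c hm] at h; exact Bool.false_ne_true h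
  have hs : PySem.Str.startswith c "source_" = false := by
    cases hb : PySem.Str.startswith c "source_"
    · rfl
    · rw [pv_src_not_cds c hb] at h; exact absurd h (by simp)
  have h' : PySem.Chars.startswith c.toList ['c', 'd', 's', '_'] = true := by
    rw [PySem.Str.startswith_eq] at h; exact h
  have hs' : PySem.Chars.startswith c.toList ['s', 'o', 'u', 'r', 'c', 'e', '_'] = false := by
    rw [PySem.Str.startswith_eq] at hs; exact hs
  simp [pvKey, pv_get_none hn, hs', h']

theorem pv_key_else {c : String} (hn : c ∉ pvPriorityOrder)
    (h1 : PySem.Str.startswith c "source_" = false) (h2 : PySem.Str.startswith c "cds_" = false)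
    (h3 : c ≠ "nucleotide_sequence") : pvKey c = (23, c) := by
  have h1' : PySem.Chars.startswith c.toList ['s', 'o', 'u', 'r', 'c', 'e', '_'] = false := by
    rw [PySem.Str.startswith_eq] at h1; exact h1
  have h2' : PySem.Chars.startswith c.toList ['c', 'd', 's', '_'] = false := by
    rw [PySem.Str.startswith_eq] at h2; exact h2
  simp [pvKey, pv_get_none hn, h1', h2', h3]

-- membership in the buckets
theorem pv_mem_B0 {a : String} {xs : List String} :
    a ∈ pvB0 xs ↔ a ∈ pvPriorityOrder ∧ a ∈ xs := by
  simp [pvB0, List.mem_filter, List.contains_eq_mem]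

theorem pv_mem_B1 {a : String} {xs : List String} :
    a ∈ pvB1 xs ↔ a ∈ xs ∧ PySem.Str.startswith a "source_" = true := by
  simp [pvB1, PySem.List.mem_sorted, List.mem_filter]

theorem pv_mem_B2 {a : String} {xs : List String} :
    a ∈ pvB2 xs ↔ a ∈ xs ∧ PySem.Str.startswith a "cds_" = true := by
  simp [pvB2, PySem.List.mem_sorted, List.mem_filter]

theorem pv_mem_B3 {a : String} {xs : List String} :
    a ∈ pvB3 xs ↔ a = "nucleotide_sequence" ∧ "nucleotide_sequence" ∈ xs := by
  unfold pvB3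
  split
  · next h => simp_all [List.contains_eq_mem]
  · next h => simp_all [List.contains_eq_mem]

theorem pv_mem_Pre4 {a : String} {xs : List String} :
    a ∈ pvPre4 xs ↔ a ∈ xs ∧ (a ∈ pvPriorityOrder ∨ PySem.Str.startswith a "source_" = true ∨
      PySem.Str.startswith a "cds_" = true ∨ a = "nucleotide_sequence") := by
  simp only [pvPre4, List.mem_append, pv_mem_B0, pv_mem_B1, pv_mem_B2, pv_mem_B3]
  constructor
  · rintro (((⟨hp, hx⟩ | ⟨hx, hs⟩) | ⟨hx, hc⟩) | ⟨rfl, hx⟩)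
    · exact ⟨hx, Or.inl hp⟩
    · exact ⟨hx, Or.inr (Or.inl hs)⟩
    · exact ⟨hx, Or.inr (Or.inr (Or.inl hc))⟩
    · exact ⟨hx, Or.inr (Or.inr (Or.inr rfl))⟩
  · rintro ⟨hx, (hp | hs | hc | rfl)⟩
    · exact Or.inl (Or.inl (Or.inl ⟨hp, hx⟩))
    · exact Or.inl (Or.inl (Or.inr ⟨hx, hs⟩))
    · exact Or.inl (Or.inr ⟨hx, hc⟩)
    · exact Or.inr ⟨rfl, hx⟩

theorem pv_mem_B4 {a : String} {xs : List String} :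
    a ∈ pvB4 xs ↔ a ∈ xs ∧ ¬(a ∈ pvPriorityOrder ∨ PySem.Str.startswith a "source_" = true ∨
      PySem.Str.startswith a "cds_" = true ∨ a = "nucleotide_sequence") := by
  simp only [pvB4, PySem.List.mem_sorted, List.mem_filter, Bool.not_eq_eq_eq_not, Bool.not_true,
    List.contains_eq_mem, decide_eq_false_iff_not, pv_mem_Pre4]
  tauto

-- keys on the buckets
theorem pv_key_of_B1 {a : String} {xs : List String} (h : a ∈ pvB1 xs) : pvKey a = (20, a) :=
  pv_key_src (pv_mem_B1.mp h).2

theorem pv_key_of_B2 {a : String} {xs : List String} (h : a ∈ pvB2 xs) : pvKey a = (21, a) :=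
  pv_key_cds (pv_mem_B2.mp h).2

theorem pv_key_of_B3 {a : String} {xs : List String} (h : a ∈ pvB3 xs) : pvKey a = (22, "") := by
  rw [(pv_mem_B3.mp h).1]; exact pv_key_nuc

theorem pv_key_of_B4 {a : String} {xs : List String} (h : a ∈ pvB4 xs) : pvKey a = (23, a) := by
  have h' := (pv_mem_B4.mp h).2
  push Not at h'
  obtain ⟨hn, hs, hc, hq⟩ := h'
  exact pv_key_else hn (by cases hb : PySem.Str.startswith a "source_" <;> simp_all)
    (by cases hb : PySem.Str.startswith a "cds_" <;> simp_all) hq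

theorem pv_key_of_B0 {a : String} {xs : List String} (h : a ∈ pvB0 xs) :
    (pvKey a).1 < 20 ∧ (pvKey a).2 = "" :=
  pv_key_prio a (pv_mem_B0.mp h).1

-- lexicographic comparison on pvKeyL
theorem pv_lt_iff (a b : String) :
    pvKeyL a < pvKeyL b ↔ (pvKey a).1 < (pvKey b).1 ∨ ((pvKey a).1 = (pvKey b).1 ∧ (pvKey a).2 < (pvKey b).2) := by
  simp [pvKeyL, Prod.Lex.lt_iff]

-- within-bucket strict key order for a sorted, duplicate-free bucket of constant first key
theorem pv_pairwise_sorted_bucket (l : List String) (hl : l.Nodup) (k : Int)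
    (hk : ∀ a ∈ PySem.List.sorted l (fun x => x) false, pvKey a = (k, a)) :
    (PySem.List.sorted l (fun x => x) false).Pairwise (fun a b => pvKeyL a < pvKeyL b) := by
  have hnd : (PySem.List.sorted l (fun x => x) false).Nodup :=
    ((PySem.List.sorted_perm l (fun x => x) false).nodup_iff).mpr hl
  have hle := PySem.List.sorted_pairwise l (fun x => x)
  have := hle.and hnd
  refine this.imp_of_mem ?_
  intro a b ha hb ⟨h1, h2⟩
  rw [pv_lt_iff, hk a ha, hk b hb]
  exact Or.inr ⟨rfl, lt_of_le_of_ne h1 h2⟩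

-- pairwise key order on A's whole result
theorem pv_pairwise_all (xs : List String) (h : xs.Nodup) :
    (pvPre4 xs ++ pvB4 xs).Pairwise (fun a b => pvKeyL a < pvKeyL b) := by
  have cross : ∀ (a b : String), (pvKey a).1 < (pvKey b).1 → pvKeyL a < pvKeyL b :=
    fun a b hlt => (pv_lt_iff a b).mpr (Or.inl hlt)
  have f0 : ∀ a ∈ pvB0 xs, (pvKey a).1 < 20 := fun a ha => (pv_key_of_B0 ha).1
  have f1 : ∀ a ∈ pvB1 xs, (pvKey a).1 = 20 := fun a ha => by rw [pv_key_of_B1 ha]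
  have f2 : ∀ a ∈ pvB2 xs, (pvKey a).1 = 21 := fun a ha => by rw [pv_key_of_B2 ha]
  have f3 : ∀ a ∈ pvB3 xs, (pvKey a).1 = 22 := fun a ha => by rw [pv_key_of_B3 ha]
  have f4 : ∀ a ∈ pvB4 xs, (pvKey a).1 = 23 := fun a ha => by rw [pv_key_of_B4 ha]
  have p0 : (pvB0 xs).Pairwise (fun a b => pvKeyL a < pvKeyL b) :=
    List.Pairwise.sublist List.filter_sublist pv_pairwise_prio_key
  have p1 : (pvB1 xs).Pairwise (fun a b => pvKeyL a < pvKeyL b) :=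
    pv_pairwise_sorted_bucket _ (h.filter _) 20 (fun a ha => pv_key_of_B1 ha)
  have p2 : (pvB2 xs).Pairwise (fun a b => pvKeyL a < pvKeyL b) :=
    pv_pairwise_sorted_bucket _ (h.filter _) 21 (fun a ha => pv_key_of_B2 ha)
  have p3 : (pvB3 xs).Pairwise (fun a b => pvKeyL a < pvKeyL b) := by
    unfold pvB3; split <;> simp
  have p4 : (pvB4 xs).Pairwise (fun a b => pvKeyL a < pvKeyL b) :=
    pv_pairwise_sorted_bucket _ (h.filter _) 23 (fun a ha => pv_key_of_B4 ha)
  simp only [pvPre4, List.pairwise_append, List.mem_append]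
  refine ⟨⟨⟨⟨p0, p1, ?_⟩, p2, ?_⟩, p3, ?_⟩, p4, ?_⟩
  · intro a ha b hb
    exact cross a b (by have := f0 a ha; have := f1 b hb; omega)
  · intro a ha b hb
    refine cross a b ?_
    have hb' := f2 b hb
    rcases ha with ha | ha
    · have := f0 a ha; omega
    · have := f1 a ha; omega
  · intro a ha b hb
    refine cross a b ?_
    have hb' := f3 b hb
    rcases ha with (ha | ha) | ha
    · have := f0 a ha; omega
    · have := f1 a ha; omega
    · have := f2 a ha; omega
  · intro a ha b hb
    refine cross a b ?_
    have hb' := f4 b hb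
    rcases ha with ((ha | ha) | ha) | ha
    · have := f0 a ha; omega
    · have := f1 a ha; omega
    · have := f2 a ha; omega
    · have := f3 a ha; omega

-- A's result is a permutation of the input
theorem pv_perm (xs : List String) (h : xs.Nodup) : (pvPre4 xs ++ pvB4 xs).Perm xs := by
  have hnd : (pvPre4 xs ++ pvB4 xs).Nodup :=
    (pv_pairwise_all xs h).imp (fun {a b} hlt => by
      intro rfl_eq; subst rfl_eq; exact absurd hlt (lt_irrefl _))
  rw [List.perm_ext_iff_of_nodup hnd h]
  intro a
  simp only [List.mem_append, pv_mem_Pre4, pv_mem_B4]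
  constructor
  · rintro (⟨hx, _⟩ | ⟨hx, _⟩) <;> exact hx
  · intro hx
    by_cases hq : a ∈ pvPriorityOrder ∨ PySem.Str.startswith a "source_" = true ∨
      PySem.Str.startswith a "cds_" = true ∨ a = "nucleotide_sequence"
    · exact Or.inl ⟨hx, hq⟩
    · exact Or.inr ⟨hx, hq⟩

-- ===== VERDICT (by name: the statement is the Claim_ definition above) =====
theorem get_ordered_columns_spec : Claim_equal_get_ordered_columns := by
  intro xs hdom hpre
  unfold Spec_get_ordered_columns
  have hnd : xs.Nodup := hpre
  rw [pv_A_buckets]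
  unfold get_ordered_columns_alt
  rw [pv_sorted2_eq_sorted_toLex]
  have hk : (fun c => toLex ((pvKey c).1, (pvKey c).2)) = pvKeyL := by
    funext c; simp [pvKeyL]
  rw [hk]
  exact (PySem.List.sorted_eq_of_perm_of_pairwise_lt xs _ pvKeyL (pv_perm xs hnd)
    (pv_pairwise_all xs hnd)).symm
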